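-- pv_equiv track=rewrite | github.com/pwmcclung/practProbs | letters.py | play_if_enough
-- ===== SOURCE A (Python) =====
-- from collections import Counter
--
-- def play_if_enough(hand, play):
--
--     hand_count = Counter(hand)
--     play_count = Counter(play)
--
--     can_play = all(hand_count[resource] >= play_count[resource] for resource in play_count)
--
--     if can_play:
--         updated_hand = ""
--         for resource, count in hand_count.items():
--             updated_hand += resource * (count - play_count.get(resource, 0))
--         return (True, updated_hand)
--     else:
--         return (False, hand)
-- ===== SOURCE B (Python) =====
-- def play_if_enough(hand, play):
--     pool = list(hand)
--     for c in play:
--         if c in pool: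
--             pool.remove(c)
--         else:
--             return (False, hand)
--     return (True, ''.join(d for c in dict.fromkeys(hand) for d in pool if d == c))
-- ===== Notes on version B (the rewrite author's own statement) =====
-- stated objective: alternative
-- what changed: Replaces A's counter-dict construction and count-comparison check with a sequential multiset-subtraction algorithm: each play character is erased one at a time from a working copy of hand (early-exit on a missing character), and the leftover is regrouped by filtering the pool per distinct hand character; no counts or counters anywhere.
import Mathlib
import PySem

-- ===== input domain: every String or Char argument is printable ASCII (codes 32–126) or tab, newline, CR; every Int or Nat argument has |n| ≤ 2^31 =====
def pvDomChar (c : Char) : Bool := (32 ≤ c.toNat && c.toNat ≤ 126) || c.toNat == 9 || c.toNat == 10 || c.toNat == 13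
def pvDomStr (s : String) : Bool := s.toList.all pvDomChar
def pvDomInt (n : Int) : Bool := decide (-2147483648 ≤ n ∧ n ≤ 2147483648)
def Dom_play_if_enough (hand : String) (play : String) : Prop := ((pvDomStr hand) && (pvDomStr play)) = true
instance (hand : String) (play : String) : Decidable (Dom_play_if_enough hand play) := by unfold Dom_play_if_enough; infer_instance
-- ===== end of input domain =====

-- B replaces A's counter dicts with sequential erasure of each play character from a working
-- copy of hand (early exit on a missing one) plus a regrouping filter pass; alternative algorithm.

-- ===== PORT A =====
def play_if_enough (hand : String) (play : String) : Bool × String :=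
  let hand_count := PySem.Dict.counter hand.toList
  let play_count := PySem.Dict.counter play.toList
  let can_play := play_count.keys.all (fun r => decide (hand_count.getD r 0 ≥ play_count.getD r 0))
  if can_play then
    let updated_hand := hand_count.items.foldl
      (fun acc rc => acc ++ List.replicate (rc.2 - play_count.getD rc.1 0).toNat rc.1) ([] : List Char)
    (true, String.ofList updated_hand)
  else
    (false, hand)

-- ===== PORT B =====
-- the removal loop of Source B: erase each play char from the pool; none = the early (False, hand) return
def pvRemoveAll (pool : List Char) (rest : List Char) : Option (List Char) :=
  match rest with
  | [] => some pool
  | c :: rest' =>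
    match PySem.List.remove? pool c with
    | some q => pvRemoveAll q rest'
    | none => none

def play_if_enough_alt (hand : String) (play : String) : Bool × String :=
  match pvRemoveAll hand.toList play.toList with
  | none => (false, hand)
  | some pool =>
    (true, String.ofList ((PySem.List.dedup hand.toList).flatMap (fun c => pool.filter (· == c))))

-- ===== PRECONDITION & SPEC =====
def Spec_play_if_enough (hand : String) (play : String) (out : Bool × String) : Prop := out = play_if_enough_alt hand play
instance (hand : String) (play : String) (out : Bool × String) : Decidable (Spec_play_if_enough hand play out) := by unfold Spec_play_if_enough; infer_instance

-- ===== CLAIM (what is proved, stated in full; the proofs are below) =====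
def Claim_equal_play_if_enough : Prop := ∀ (hand : String) (play : String), Dom_play_if_enough hand play → Spec_play_if_enough hand play (play_if_enough hand play)

-- ===== LEMMAS AND PROOFS =====

-- the removal loop succeeds iff every character of rest occurs often enough in the pool
theorem pvRemoveAll_isSome (rest pool : List Char) :
    (pvRemoveAll pool rest).isSome ↔ ∀ c ∈ rest, rest.count c ≤ pool.count c := by
  induction rest generalizing pool with
  | nil => simp [pvRemoveAll]
  | cons c rest' ih =>
    unfold pvRemoveAll
    by_cases hmem : c ∈ pool
    · rw [PySem.List.remove?_eq_some_erase pool c hmem]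
      simp only [ih]
      have hcpos : 1 ≤ pool.count c := List.count_pos_iff.mpr hmem
      constructor
      · intro h d hd
        simp only [List.count_cons]
        by_cases hdc : c = d
        · subst hdc
          by_cases hcr : c ∈ rest'
          · have := h c hcr
            simp only [List.count_erase, beq_self_eq_true, if_true] at this
            simp only [beq_self_eq_true, if_true]
            omega
          · simp only [List.count_eq_zero.mpr hcr, beq_self_eq_true, if_true]
            omega
        · have hd' : d ∈ rest' := by
            rcases List.mem_cons.mp hd with h1 | h1
            · exact absurd h1.symm hdc
            · exact h1
          have := h d hd'
          simp only [List.count_erase, beq_iff_eq, if_neg hdc] at this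
          simp only [beq_iff_eq, if_neg hdc]
          omega
      · intro h d hd
        have := h d (List.mem_cons_of_mem c hd)
        simp only [List.count_erase, List.count_cons] at *
        by_cases hdc : c = d
        · subst hdc
          simp only [beq_self_eq_true, if_true] at *
          omega
        · simp only [beq_iff_eq, if_neg hdc] at *
          omega
    · rw [(PySem.List.remove?_eq_none_iff pool c).mpr hmem]
      have h0 : pool.count c = 0 := List.count_eq_zero.mpr hmem
      simp only [Option.isSome_none, Bool.false_eq_true, false_iff]
      intro h
      have := h c (List.mem_cons_self ..)
      simp [List.count_cons_self, h0] at this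

-- on success the leftover pool has the counts of pool minus rest
theorem pvRemoveAll_count (rest pool q : List Char) (h : pvRemoveAll pool rest = some q)
    (c : Char) : q.count c = pool.count c - rest.count c := by
  induction rest generalizing pool with
  | nil => simp [pvRemoveAll] at h; subst h; simp
  | cons d rest' ih =>
    unfold pvRemoveAll at h
    by_cases hmem : d ∈ pool
    · rw [PySem.List.remove?_eq_some_erase pool d hmem] at h
      rw [ih (pool.erase d) h]
      simp only [List.count_erase, List.count_cons]
      by_cases hdc : d = c
      · subst hdc
        simp only [beq_self_eq_true, if_true]
        omega
      · simp only [beq_iff_eq, if_neg hdc]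
        omega
    · rw [(PySem.List.remove?_eq_none_iff pool d).mpr hmem] at h
      simp at h

-- A's feasibility check, in terms of counts
theorem pv_can_eq (h p : List Char) :
    ((PySem.Dict.counter p).keys.all
      (fun r => decide ((PySem.Dict.counter h).getD r 0 ≥ (PySem.Dict.counter p).getD r 0)) = true)
    ↔ ∀ c ∈ p, p.count c ≤ h.count c := by
  simp only [PySem.Dict.keys_counter, PySem.Dict.getD_counter, List.all_eq_true,
    PySem.Set.mem_ofList, ge_iff_le, decide_eq_true_eq, Nat.cast_le]

-- A's fold over the counter items, as a flatMap of replicates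
theorem pv_updated_eq (h p : List Char) :
    (PySem.Dict.counter h).items.foldl
      (fun acc rc => acc ++ List.replicate (rc.2 - (PySem.Dict.counter p).getD rc.1 0).toNat rc.1)
      ([] : List Char) =
    (PySem.List.dedup h).flatMap (fun c => List.replicate (h.count c - p.count c) c) := by
  rw [PySem.Dict.items_counter, PySem.List.foldl_append_eq_flatMap, List.flatMap_map]
  simp [PySem.Dict.getD_counter]

-- ===== VERDICT (by name: the statement is the Claim_ definition above) =====
theorem play_if_enough_spec : Claim_equal_play_if_enough := by
  intro hand play _
  show play_if_enough hand play = play_if_enough_alt hand play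
  unfold play_if_enough play_if_enough_alt
  cases hr : pvRemoveAll hand.toList play.toList with
  | none =>
    have hnot : ¬ ∀ c ∈ play.toList, play.toList.count c ≤ hand.toList.count c := by
      rw [← pvRemoveAll_isSome, hr]; simp
    simp only []
    rw [if_neg (fun hc => hnot ((pv_can_eq _ _).mp hc))]
  | some pool =>
    have hsome : ∀ c ∈ play.toList, play.toList.count c ≤ hand.toList.count c :=
      (pvRemoveAll_isSome play.toList hand.toList).mp (by rw [hr]; rfl)
    have hfe : (fun c => pool.filter (· == c)) =
        fun c => List.replicate (hand.toList.count c - play.toList.count c) c :=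
      funext fun c => by rw [List.filter_beq, pvRemoveAll_count play.toList hand.toList pool hr c]
    simp only []
    rw [if_pos ((pv_can_eq hand.toList play.toList).mpr hsome), pv_updated_eq, hfe]
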